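-- pv_equiv track=rewrite | github.com/mikydna/parlay | src/prop_ev/brief_builder.py | upsert_analyst_take_section
-- ===== SOURCE A (Python) =====
-- def upsert_analyst_take_section(markdown: str, analyst_section_markdown: str) -> str:
--     """Insert/replace Analyst Take section before Action Plan with page breaks."""
--     lines = markdown.splitlines()
--     lines, _ = _extract_top_level_section(lines, "## Pre-Bet Checklist")
--     lines, _ = _extract_top_level_section(lines, "## Analyst Take")
--
--     action_idx: int | None = None
--     for idx, line in enumerate(lines):
--         if line.strip() == "## Action Plan (GO / LEAN / NO-GO)":
--             action_idx = idx
--             break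
--     if action_idx is None:
--         return markdown.rstrip() + "\n"
--
--     block = ["<!-- pagebreak -->", ""]
--     block.extend(analyst_section_markdown.splitlines())
--     block.extend(["", "<!-- pagebreak -->", ""])
--     merged = lines[:action_idx] + block + lines[action_idx:]
--     return "\n".join(merged).rstrip() + "\n"
--
-- def _extract_top_level_section(lines: list[str], heading: str) -> tuple[list[str], list[str]]:
--     start_idx: int | None = None
--     for idx, line in enumerate(lines):
--         if line.strip() == heading:
--             start_idx = idx
--             break
--     if start_idx is None:
--         return lines, []
--
--     end_idx = len(lines)
--     for idx in range(start_idx + 1, len(lines)):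
--         if lines[idx].strip().startswith("## "):
--             end_idx = idx
--             break
--
--     trim_idx = end_idx
--     while trim_idx > start_idx and not lines[trim_idx - 1].strip():
--         trim_idx -= 1
--     if trim_idx > start_idx and lines[trim_idx - 1].strip() == "<!-- pagebreak -->":
--         trim_idx -= 1
--         while trim_idx > start_idx and not lines[trim_idx - 1].strip():
--             trim_idx -= 1
--
--     section = lines[start_idx:trim_idx]
--     remaining = lines[:start_idx] + lines[trim_idx:]
--     return remaining, section
-- ===== SOURCE B (Python) =====
-- _PAGEBREAK = "<!-- pagebreak -->"
-- _ACTION_HEADING = "## Action Plan (GO / LEAN / NO-GO)"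
--
--
-- def _parse_sections(lines):
--     """One pass: split into (preamble, records); each record = (heading_line, body_lines),
--     opened by a line whose strip() starts with '## '."""
--     pre, records = [], []
--     for line in lines:
--         if line.strip().startswith("## "):
--             records.append((line, []))
--         elif records:
--             records[-1][1].append(line)
--         else:
--             pre.append(line)
--     return pre, records
--
--
-- def _trailing_tail(body):
--     """The trailing blank lines (and an optional pagebreak with blanks before it)
--     that stay in the document when this section is removed."""
--     i = len(body)
--     while i and not body[i - 1].strip():
--         i -= 1
--     if i and body[i - 1].strip() == _PAGEBREAK:
--         i -= 1
--         while i and not body[i - 1].strip():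
--             i -= 1
--     return body[i:]
--
--
-- def _drop_record(records, heading):
--     """Remove the first record titled `heading`; its trailing tail is kept in place,
--     i.e. appended to the preceding record's body (returned separately if it was first)."""
--     out = []
--     extra = []
--     removed = False
--     for h, body in records:
--         if not removed and h.strip() == heading:
--             tail = _trailing_tail(body)
--             if out:
--                 ph, pb = out[-1]
--                 out[-1] = (ph, pb + tail)
--             else:
--                 extra = tail
--             removed = True
--         else:
--             out.append((h, body))
--     return extra, out
--
--
-- def upsert_analyst_take_section(markdown: str, analyst_section_markdown: str) -> str:
--     pre, records = _parse_sections(markdown.splitlines())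
--     extra, records = _drop_record(records, "## Pre-Bet Checklist")
--     pre = pre + extra
--     extra, records = _drop_record(records, "## Analyst Take")
--     pre = pre + extra
--
--     block = [_PAGEBREAK, ""] + analyst_section_markdown.splitlines() + ["", _PAGEBREAK, ""]
--     out = list(pre)
--     found = False
--     for h, body in records:
--         if not found and h.strip() == _ACTION_HEADING:
--             out.extend(block)
--             found = True
--         out.append(h)
--         out.extend(body)
--     if not found:
--         return markdown.rstrip() + "\n"
--     return "\n".join(out).rstrip() + "\n"
-- ===== Notes on version B (the rewrite author's own statement) =====
-- stated objective: alternative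
-- what changed: A works on the flat line list with repeated index scans, while-loop trim indices and slice arithmetic; B parses the document once into a preamble plus (heading, body) section records, drops the two target records structurally (re-attaching each trimmed-off tail to the preceding segment) and rebuilds the lines with the analyst block inserted before the Action Plan record.
import Mathlib
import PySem

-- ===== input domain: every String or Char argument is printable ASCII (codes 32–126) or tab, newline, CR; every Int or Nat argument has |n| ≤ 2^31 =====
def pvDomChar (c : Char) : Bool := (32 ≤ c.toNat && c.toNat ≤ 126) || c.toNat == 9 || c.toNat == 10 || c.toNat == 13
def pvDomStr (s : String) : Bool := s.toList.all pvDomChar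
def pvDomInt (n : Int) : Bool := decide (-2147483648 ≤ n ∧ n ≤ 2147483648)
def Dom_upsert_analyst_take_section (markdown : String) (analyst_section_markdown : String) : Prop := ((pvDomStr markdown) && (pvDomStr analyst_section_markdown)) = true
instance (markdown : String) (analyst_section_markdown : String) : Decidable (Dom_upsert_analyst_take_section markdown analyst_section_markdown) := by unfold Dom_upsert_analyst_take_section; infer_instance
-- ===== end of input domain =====

-- B replaces A's repeated flat index scans and slice arithmetic by one parse of the
-- document into (preamble, records of heading×body); an alternative decomposition of the
-- same linear-time task, no speed claim.

-- ===== PORT A =====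
-- `lines.getD idx ""` below is Python's `lines[idx]`: exact because every index these loops use is in range.
-- `for idx, line in enumerate(lines): if line.strip() == t: return idx` (first match)
def pvFindIdxAux (t : String) : Nat → List String → Option Nat
  | _, [] => none
  | i, l :: ls => if PySem.Str.strip l = t then some i else pvFindIdxAux t (i + 1) ls

-- `for idx in range(i, len(lines)): if lines[idx].strip().startswith("## "): return idx` else len(lines)
def pvFindEndAux (lines : List String) (i : Nat) : Nat :=
  if i < lines.length then
    if PySem.Str.startswith (PySem.Str.strip (lines.getD i "")) "## " then i
    else pvFindEndAux lines (i + 1)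
  else lines.length
termination_by lines.length - i
decreasing_by omega

-- `while trim > floor and not lines[trim-1].strip(): trim -= 1`
def pvTrimBlank (lines : List String) (floor : Nat) : Nat → Nat
  | 0 => 0
  | i + 1 =>
    if floor < i + 1 ∧ PySem.Str.strip (lines.getD i "") = "" then pvTrimBlank lines floor i
    else i + 1

def pvExtract (lines : List String) (heading : String) : List String × List String :=
  match pvFindIdxAux heading 0 lines with
  | none => (lines, [])
  | some s =>
    let e := pvFindEndAux lines (s + 1)
    let t1 := pvTrimBlank lines s e
    let t2 := if s < t1 ∧ PySem.Str.strip (lines.getD (t1 - 1) "") = "<!-- pagebreak -->"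
              then pvTrimBlank lines s (t1 - 1) else t1
    (lines.take s ++ lines.drop t2, (lines.take t2).drop s)

def upsert_analyst_take_section (markdown : String) (analyst_section_markdown : String) : String :=
  let lines0 := PySem.Str.splitlines markdown
  let lines1 := (pvExtract lines0 "## Pre-Bet Checklist").1
  let lines := (pvExtract lines1 "## Analyst Take").1
  match pvFindIdxAux "## Action Plan (GO / LEAN / NO-GO)" 0 lines with
  | none => PySem.Str.rstrip markdown ++ "\n"
  | some a =>
    let block := ["<!-- pagebreak -->", ""] ++ PySem.Str.splitlines analyst_section_markdown
      ++ ["", "<!-- pagebreak -->", ""]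
    PySem.Str.rstrip (PySem.Str.join "\n" (lines.take a ++ block ++ lines.drop a)) ++ "\n"

-- ===== PORT B =====
def pvIsHeading (l : String) : Bool := PySem.Str.startswith (PySem.Str.strip l) "## "

def pvParseStep (st : List String × List (String × List String)) (line : String) :
    List String × List (String × List String) :=
  if pvIsHeading line then (st.1, st.2 ++ [(line, [])])
  else
    match st.2.getLast? with
    | none => (st.1 ++ [line], st.2)
    | some (h, b) => (st.1, st.2.dropLast ++ [(h, b ++ [line])])

def pvParse (lines : List String) : List String × List (String × List String) :=
  lines.foldl pvParseStep ([], [])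

-- `while i and not body[i-1].strip(): i -= 1`
def pvTailAux (body : List String) : Nat → Nat
  | 0 => 0
  | i + 1 => if PySem.Str.strip (body.getD i "") = "" then pvTailAux body i else i + 1

def pvTrailingTail (body : List String) : List String :=
  let i := pvTailAux body body.length
  let i2 := if 0 < i ∧ PySem.Str.strip (body.getD (i - 1) "") = "<!-- pagebreak -->"
            then pvTailAux body (i - 1) else i
  body.drop i2

def pvDropRec (heading : String) :
    List (String × List String) → List String × List (String × List String)
  | [] => ([], [])
  | (h, b) :: rest =>
    if PySem.Str.strip h = heading then (pvTrailingTail b, rest)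
    else
      let r := pvDropRec heading rest
      ([], (h, b ++ r.1) :: r.2)

def pvFlattenRecs : List (String × List String) → List String
  | [] => []
  | (h, b) :: rest => h :: (b ++ pvFlattenRecs rest)

-- the rebuild loop; `none` = the `found` flag stayed False
def pvEmit (block : List String) : List (String × List String) → Option (List String)
  | [] => none
  | (h, b) :: rest =>
    if PySem.Str.strip h = "## Action Plan (GO / LEAN / NO-GO)" then
      some (block ++ h :: (b ++ pvFlattenRecs rest))
    else
      match pvEmit block rest with
      | none => none
      | some out => some (h :: (b ++ out))

def upsert_analyst_take_section_alt (markdown : String) (analyst_section_markdown : String) : String :=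
  let p := pvParse (PySem.Str.splitlines markdown)
  let d1 := pvDropRec "## Pre-Bet Checklist" p.2
  let d2 := pvDropRec "## Analyst Take" d1.2
  let pre := p.1 ++ d1.1 ++ d2.1
  let block := ["<!-- pagebreak -->", ""] ++ PySem.Str.splitlines analyst_section_markdown
    ++ ["", "<!-- pagebreak -->", ""]
  match pvEmit block d2.2 with
  | none => PySem.Str.rstrip markdown ++ "\n"
  | some out => PySem.Str.rstrip (PySem.Str.join "\n" (pre ++ out)) ++ "\n"

-- ===== PRECONDITION & SPEC =====
def Spec_upsert_analyst_take_section (markdown : String) (analyst_section_markdown : String) (out : String) : Prop := out = upsert_analyst_take_section_alt markdown analyst_section_markdown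
instance (markdown : String) (analyst_section_markdown : String) (out : String) : Decidable (Spec_upsert_analyst_take_section markdown analyst_section_markdown out) := by unfold Spec_upsert_analyst_take_section; infer_instance

-- ===== CLAIM (what is proved, stated in full; the proofs are below) =====
def Claim_equal_upsert_analyst_take_section : Prop := ∀ (markdown : String) (analyst_section_markdown : String), Dom_upsert_analyst_take_section markdown analyst_section_markdown → Spec_upsert_analyst_take_section markdown analyst_section_markdown (upsert_analyst_take_section markdown analyst_section_markdown)

-- ===== LEMMAS AND PROOFS =====

-- no line of `pre` matches a "## "-shaped heading by `.strip()` equality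
def pvNoHead (pre : List String) : Prop := ∀ l ∈ pre, pvIsHeading l = false

def pvWF (recs : List (String × List String)) : Prop :=
  ∀ p ∈ recs, pvIsHeading p.1 = true ∧ pvNoHead p.2

lemma pvFlattenRecs_append (r1 r2 : List (String × List String)) :
    pvFlattenRecs (r1 ++ r2) = pvFlattenRecs r1 ++ pvFlattenRecs r2 := by
  induction r1 with
  | nil => rfl
  | cons p r ih => cases p; simp [pvFlattenRecs, ih]

lemma pvParseStep_flat (st : List String × List (String × List String)) (line : String) :
    (pvParseStep st line).1 ++ pvFlattenRecs (pvParseStep st line).2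
      = (st.1 ++ pvFlattenRecs st.2) ++ [line] := by
  by_cases hl : pvIsHeading line = true
  · have hgoal : pvParseStep st line = (st.1, st.2 ++ [(line, [])]) := by
      simp [pvParseStep, hl]
    rw [hgoal]
    simp [pvFlattenRecs_append, pvFlattenRecs]
  · cases hlast : st.2.getLast? with
    | none =>
      have h0 : st.2 = [] := List.getLast?_eq_none_iff.mp hlast
      have hgoal : pvParseStep st line = (st.1 ++ [line], st.2) := by
        simp [pvParseStep, hl, hlast]
      rw [hgoal, h0]
      simp [pvFlattenRecs]
    | some p =>
      obtain ⟨h, b⟩ := p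
      obtain ⟨l', hst⟩ := List.getLast?_eq_some_iff.mp hlast
      have hgoal : pvParseStep st line = (st.1, st.2.dropLast ++ [(h, b ++ [line])]) := by
        simp [pvParseStep, hl, hlast]
      rw [hgoal, hst, List.dropLast_concat]
      simp [pvFlattenRecs_append, pvFlattenRecs]

lemma pvParseStep_inv (st : List String × List (String × List String)) (line : String)
    (h1 : pvNoHead st.1) (h2 : pvWF st.2) :
    pvNoHead (pvParseStep st line).1 ∧ pvWF (pvParseStep st line).2 := by
  by_cases hl : pvIsHeading line = true
  · have hgoal : pvParseStep st line = (st.1, st.2 ++ [(line, [])]) := by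
      simp [pvParseStep, hl]
    rw [hgoal]
    refine ⟨h1, ?_⟩
    intro p hp
    rcases List.mem_append.mp hp with hp | hp
    · exact h2 p hp
    · simp at hp; subst hp
      exact ⟨hl, by intro l hl0; simp at hl0⟩
  · cases hlast : st.2.getLast? with
    | none =>
      have hgoal : pvParseStep st line = (st.1 ++ [line], st.2) := by
        simp [pvParseStep, hl, hlast]
      rw [hgoal]
      refine ⟨?_, h2⟩
      intro l hls
      rcases List.mem_append.mp hls with hls | hls
      · exact h1 l hls
      · simp at hls; subst hls; simpa using hl
    | some p =>
      obtain ⟨hh, bb⟩ := p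
      obtain ⟨l', hst⟩ := List.getLast?_eq_some_iff.mp hlast
      have hgoal : pvParseStep st line = (st.1, st.2.dropLast ++ [(hh, bb ++ [line])]) := by
        simp [pvParseStep, hl, hlast]
      rw [hgoal]
      refine ⟨h1, ?_⟩
      intro p hp
      rw [hst, List.dropLast_concat] at hp
      rcases List.mem_append.mp hp with hp | hp
      · exact h2 p (by rw [hst]; exact List.mem_append.mpr (Or.inl hp))
      · simp at hp; subst hp
        have hlast2 := h2 (hh, bb) (by rw [hst]; exact List.mem_append.mpr (Or.inr (by simp)))
        refine ⟨hlast2.1, ?_⟩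
        intro l hls
        rcases List.mem_append.mp hls with hls | hls
        · exact hlast2.2 l hls
        · simp at hls; subst hls; simpa using hl

lemma pvParse_spec (lines : List String) :
    (pvParse lines).1 ++ pvFlattenRecs (pvParse lines).2 = lines
      ∧ pvNoHead (pvParse lines).1 ∧ pvWF (pvParse lines).2 := by
  suffices H : ∀ (ls : List String) (st : List String × List (String × List String)),
      pvNoHead st.1 → pvWF st.2 →
      (List.foldl pvParseStep st ls).1 ++ pvFlattenRecs (List.foldl pvParseStep st ls).2
          = (st.1 ++ pvFlattenRecs st.2) ++ ls
        ∧ pvNoHead (List.foldl pvParseStep st ls).1 ∧ pvWF (List.foldl pvParseStep st ls).2 by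
    have := H lines ([], []) (by intro l h; simp at h) (by intro p h; simp at h)
    simpa [pvParse, pvFlattenRecs] using this
  intro ls
  induction ls with
  | nil => intro st h1 h2; exact ⟨by simp, h1, h2⟩
  | cons l ls ih =>
    intro st h1 h2
    have hinv := pvParseStep_inv st l h1 h2
    have hflat := pvParseStep_flat st l
    have := ih (pvParseStep st l) hinv.1 hinv.2
    refine ⟨?_, this.2⟩
    rw [List.foldl_cons, this.1, hflat]
    simp

lemma pvGetD_append_len (X ys : List String) (i : Nat) :
    (X ++ ys).getD (X.length + i) "" = ys.getD i "" := by
  induction X with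
  | nil => simp
  | cons x X ih => simpa [Nat.succ_add] using ih

lemma pvFindIdxAux_shift (t : String) (i : Nat) (ls : List String) :
    pvFindIdxAux t i ls = (pvFindIdxAux t 0 ls).map (· + i) := by
  induction ls generalizing i with
  | nil => simp [pvFindIdxAux]
  | cons l ls ih =>
    by_cases hm : PySem.Str.strip l = t
    · simp [pvFindIdxAux, hm]
    · simp only [pvFindIdxAux, hm, if_false]
      rw [ih (i + 1), ih 1]
      cases pvFindIdxAux t 0 ls with
      | none => simp
      | some k => simp; omega

lemma pvFindIdxAux_append (t : String) (i : Nat) (X ys : List String)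
    (hX : ∀ l ∈ X, ¬ PySem.Str.strip l = t) :
    pvFindIdxAux t i (X ++ ys) = pvFindIdxAux t (i + X.length) ys := by
  induction X generalizing i with
  | nil => simp
  | cons x X ih =>
    have hx : ¬ PySem.Str.strip x = t := hX x (by simp)
    simp only [List.cons_append, pvFindIdxAux, if_neg hx]
    rw [ih (i + 1) (fun l hl => hX l (by simp [hl]))]
    congr 1
    simp [List.length_cons]; omega

lemma pvFindIdxAux_none (t : String) (i : Nat) (ls : List String)
    (h : ∀ l ∈ ls, ¬ PySem.Str.strip l = t) :
    pvFindIdxAux t i ls = none := by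
  induction ls generalizing i with
  | nil => rfl
  | cons l ls ih =>
    simp only [pvFindIdxAux, if_neg (h l (by simp))]
    exact ih (i + 1) (fun x hx => h x (by simp [hx]))

lemma pvFindEndAux_spec (lines : List String) (i m : Nat)
    (him : i ≤ m) (hm : m ≤ lines.length)
    (hmid : ∀ k, i ≤ k → k < m → pvIsHeading (lines.getD k "") = false)
    (hend : m = lines.length ∨ (m < lines.length ∧ pvIsHeading (lines.getD m "") = true)) :
    pvFindEndAux lines i = m := by
  have hbase : pvFindEndAux lines m = m := by
    rw [pvFindEndAux]
    rcases hend with h | ⟨h, hh⟩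
    · rw [if_neg (by omega)]; omega
    · have hh2 : PySem.Str.startswith (PySem.Str.strip (lines.getD m "")) "## " = true := hh
      rw [if_pos h, if_pos hh2]
  suffices H : ∀ n i2, i2 ≤ m → (∀ k, i2 ≤ k → k < m → pvIsHeading (lines.getD k "") = false) →
      m - i2 ≤ n → pvFindEndAux lines i2 = m from H m i him hmid (by omega)
  intro n
  induction n with
  | zero =>
    intro i2 h1 _ h2
    have : i2 = m := by omega
    rw [this, hbase]
  | succ n ih =>
    intro i2 h1 hmid2 h2
    by_cases he : i2 = m
    · rw [he, hbase]
    · have hi : i2 < m := by omega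
      rw [pvFindEndAux, if_pos (by omega : i2 < lines.length)]
      have hno : pvIsHeading (lines.getD i2 "") = false := hmid2 i2 (le_refl i2) hi
      rw [if_neg (fun hc => by simp only [pvIsHeading] at hno; rw [hno] at hc; cases hc)]
      exact ih (i2 + 1) (by omega) (fun k hk1 hk2 => hmid2 k (by omega) hk2) (by omega)

lemma pvFindEndAux_shift (X ys : List String) (i : Nat) :
    pvFindEndAux (X ++ ys) (X.length + i) = X.length + pvFindEndAux ys i := by
  have hterm : ∀ j, ys.length ≤ j → pvFindEndAux (X ++ ys) (X.length + j) = X.length + pvFindEndAux ys j := by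
    intro j hj
    rw [pvFindEndAux]
    conv_rhs => rw [pvFindEndAux]
    rw [if_neg (by simp only [List.length_append]; omega), if_neg (Nat.not_lt.mpr hj)]
    simp
  suffices H : ∀ n j, ys.length - j ≤ n → pvFindEndAux (X ++ ys) (X.length + j) = X.length + pvFindEndAux ys j from H ys.length i (by omega)
  intro n
  induction n with
  | zero => intro j hj; exact hterm j (by omega)
  | succ n ih =>
    intro j hj
    by_cases hij : j < ys.length
    · rw [pvFindEndAux]
      conv_rhs => rw [pvFindEndAux]
      rw [if_pos (by simp only [List.length_append]; omega), if_pos hij, pvGetD_append_len]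
      by_cases hc : PySem.Str.startswith (PySem.Str.strip (ys.getD j "")) "## " = true
      · rw [if_pos hc, if_pos hc]
      · rw [if_neg hc, if_neg hc]
        have := ih (j + 1) (by omega)
        rw [← Nat.add_assoc] at this
        exact this
    · exact hterm j (by omega)

lemma pvTrimBlank_unfold (lines : List String) (f i : Nat) :
    pvTrimBlank lines f i
      = if f < i ∧ PySem.Str.strip (lines.getD (i - 1) "") = "" then pvTrimBlank lines f (i - 1)
        else i := by
  cases i with
  | zero => simp [pvTrimBlank]
  | succ i => simp [pvTrimBlank]

lemma pvTrimBlank_shift (X ys : List String) (f i : Nat) :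
    pvTrimBlank (X ++ ys) (X.length + f) (X.length + i) = X.length + pvTrimBlank ys f i := by
  induction i with
  | zero =>
    conv_lhs => rw [pvTrimBlank_unfold]
    conv_rhs => rw [pvTrimBlank_unfold]
    rw [if_neg (by rintro ⟨h1, -⟩; omega), if_neg (by rintro ⟨h1, -⟩; omega)]
  | succ i ih =>
    conv_lhs => rw [pvTrimBlank_unfold]
    conv_rhs => rw [pvTrimBlank_unfold]
    have e1 : X.length + (i + 1) - 1 = X.length + i := by omega
    have e2 : i + 1 - 1 = i := by omega
    rw [e1, e2, pvGetD_append_len]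
    by_cases hc : PySem.Str.strip (ys.getD i "") = ""
    · by_cases hf : f < i + 1
      · rw [if_pos ⟨by omega, hc⟩, if_pos ⟨hf, hc⟩, ih]
      · rw [if_neg (by rintro ⟨h1, -⟩; omega), if_neg (by rintro ⟨h1, -⟩; omega)]
    · rw [if_neg (by rintro ⟨-, h2⟩; exact hc h2), if_neg (by rintro ⟨-, h2⟩; exact hc h2)]

lemma pvTailAux_le (b : List String) (i : Nat) : pvTailAux b i ≤ i := by
  induction i with
  | zero => simp [pvTailAux]
  | succ i ih =>
    simp only [pvTailAux]
    split
    · omega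
    · omega

lemma pvTrimBlank_cons (h : String) (b Y : List String)
    (hh : ¬ PySem.Str.strip h = "") :
    ∀ i, i ≤ b.length → pvTrimBlank (h :: (b ++ Y)) 0 (i + 1) = pvTailAux b i + 1 := by
  intro i
  induction i with
  | zero =>
    intro _
    rw [pvTrimBlank_unfold]
    rw [if_neg (by rintro ⟨-, h2⟩; simp at h2; exact hh h2)]
    simp [pvTailAux]
  | succ i ih =>
    intro hle
    have hidx : (h :: (b ++ Y)).getD (i + 1) "" = b.getD i "" := by
      simp only [List.getD_cons_succ]
      exact List.getD_append _ _ _ _ (by omega)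
    rw [pvTrimBlank_unfold]
    simp only [Nat.add_sub_cancel, hidx]
    by_cases hc : PySem.Str.strip (b.getD i "") = ""
    · rw [if_pos ⟨by omega, hc⟩]
      rw [ih (by omega)]
      simp only [pvTailAux]
      rw [if_pos hc]
    · rw [if_neg (by rintro ⟨-, h2⟩; exact hc h2)]
      simp only [pvTailAux]
      rw [if_neg hc]

-- a line that strips to a "## "-shaped heading is itself a heading line
lemma pvNoMatch_of_noHead (t : String) (ht : pvIsHeading t = true) (hts : PySem.Str.strip t = t)
    (l : String) (hl : pvIsHeading l = false) : ¬ PySem.Str.strip l = t := by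
  intro he
  rw [pvIsHeading, he] at hl
  rw [pvIsHeading, hts] at ht
  rw [ht] at hl
  cases hl

lemma pvExtract_shift (t : String) (X ys : List String)
    (hX : ∀ l ∈ X, ¬ PySem.Str.strip l = t) :
    (pvExtract (X ++ ys) t).1 = X ++ (pvExtract ys t).1 := by
  have hfind : pvFindIdxAux t 0 (X ++ ys) = (pvFindIdxAux t 0 ys).map (· + X.length) := by
    rw [pvFindIdxAux_append t 0 X ys hX, pvFindIdxAux_shift]
    simp
  have hfinal : ∀ s τ : Nat, (X ++ ys).take (X.length + s) ++ (X ++ ys).drop (X.length + τ)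
      = X ++ (ys.take s ++ ys.drop τ) := by
    intro s τ
    rw [List.take_length_add_append, List.drop_append]
    simp [List.drop_eq_nil_of_le (by omega : X.length ≤ X.length + τ)]
  cases hf : pvFindIdxAux t 0 ys with
  | none =>
    simp only [pvExtract, hfind, hf, Option.map_none]
  | some s =>
    simp only [pvExtract, hfind, hf, Option.map_some]
    have h1 : s + X.length + 1 = X.length + (s + 1) := by omega
    rw [h1, pvFindEndAux_shift]
    have h2 : s + X.length = X.length + s := by omega
    rw [h2, pvTrimBlank_shift]
    set e := pvFindEndAux ys (s + 1) with he
    set t1 := pvTrimBlank ys s e with ht1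
    by_cases hst : s < t1
    · have h3 : X.length + t1 - 1 = X.length + (t1 - 1) := by omega
      rw [h3, pvGetD_append_len]
      by_cases hpb : PySem.Str.strip (ys.getD (t1 - 1) "") = "<!-- pagebreak -->"
      · rw [if_pos ⟨by omega, hpb⟩, if_pos ⟨hst, hpb⟩]
        rw [pvTrimBlank_shift, hfinal]
      · rw [if_neg (by rintro ⟨-, hp⟩; exact hpb hp), if_neg (by rintro ⟨-, hp⟩; exact hpb hp),
            hfinal]
    · rw [if_neg (by rintro ⟨hp, -⟩; omega), if_neg (by rintro ⟨hp, -⟩; exact hst hp), hfinal]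

lemma pvExtract_matched (t h : String) (b : List String) (rest : List (String × List String))
    (hm : PySem.Str.strip h = t)
    (hb : pvNoHead b) (hrest : pvWF rest)
    (ht0 : ¬ t = "") (htpb : ¬ t = "<!-- pagebreak -->") :
    (pvExtract (h :: (b ++ pvFlattenRecs rest)) t).1 = pvTrailingTail b ++ pvFlattenRecs rest := by
  have hh : ¬ PySem.Str.strip h = "" := by rw [hm]; exact ht0
  set F := pvFlattenRecs rest with hF
  have hfind : pvFindIdxAux t 0 (h :: (b ++ F)) = some 0 := by
    simp only [pvFindIdxAux, if_pos hm]
  have hend : pvFindEndAux (h :: (b ++ F)) 1 = 1 + b.length := by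
    apply pvFindEndAux_spec
    · omega
    · simp only [List.length_cons, List.length_append]; omega
    · intro k hk1 hk2
      obtain ⟨j, rfl⟩ : ∃ j, k = j + 1 := ⟨k - 1, by omega⟩
      simp only [List.getD_cons_succ]
      rw [List.getD_append _ _ _ _ (by omega)]
      rw [List.getD_eq_getElem b "" (by omega : j < b.length)]
      exact hb _ (List.getElem_mem _)
    · cases rest with
      | nil =>
        left
        simp only [hF, pvFlattenRecs, List.append_nil, List.length_cons]
        omega
      | cons q r =>
        obtain ⟨h2, b2⟩ := q
        right
        constructor
        · simp only [hF, pvFlattenRecs, List.length_cons, List.length_append]; omega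
        · have : (h :: (b ++ F)).getD (1 + b.length) "" = h2 := by
            have hj : 1 + b.length = b.length + 1 := by omega
            rw [hj, List.getD_cons_succ]
            have hg := pvGetD_append_len b F 0
            simp only [Nat.add_zero] at hg
            rw [hg, hF]
            simp [pvFlattenRecs]
          rw [this]
          exact (hrest (h2, b2) (by simp)).1
  have hdrop : ∀ k, k ≤ b.length → (h :: (b ++ F)).drop (k + 1) = b.drop k ++ F := by
    intro k hk
    simp only [List.drop_succ_cons]
    exact List.drop_append_of_le_length hk
  have htrim : pvTrimBlank (h :: (b ++ F)) 0 (b.length + 1) = pvTailAux b b.length + 1 :=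
    pvTrimBlank_cons h b F hh b.length (le_refl _)
  simp only [pvExtract, hfind]
  have he1 : 0 + 1 = 1 := rfl
  rw [he1, hend]
  have he2 : 1 + b.length = b.length + 1 := by omega
  rw [he2, htrim]
  set i1 := pvTailAux b b.length with hi1
  have hi1le : i1 ≤ b.length := pvTailAux_le b b.length
  simp only [pvTrailingTail]
  rw [← hi1]
  cases hi10 : i1 with
  | zero =>
    have hc1 : ¬ PySem.Str.strip ((h :: (b ++ F)).getD (0 + 1 - 1) "") = "<!-- pagebreak -->" := by
      rw [show (0 + 1 - 1 : Nat) = 0 from rfl, List.getD_cons_zero, hm]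
      exact htpb
    rw [if_neg (by rintro ⟨-, hp⟩; exact hc1 hp)]
    rw [if_neg (by rintro ⟨hp, -⟩; omega)]
    simp only [List.take_zero, List.nil_append, List.drop_zero]
    exact hdrop 0 (by omega)
  | succ j =>
    have hidx : (h :: (b ++ F)).getD (j + 1 + 1 - 1) "" = b.getD j "" := by
      simp only [Nat.add_sub_cancel, List.getD_cons_succ]
      exact List.getD_append _ _ _ _ (by omega)
    by_cases hpb : PySem.Str.strip (b.getD j "") = "<!-- pagebreak -->"
    · rw [if_pos ⟨by omega, by rw [hidx]; exact hpb⟩]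
      rw [if_pos ⟨by omega, by simpa using hpb⟩]
      have he3 : j + 1 + 1 - 1 = j + 1 := by omega
      rw [he3, pvTrimBlank_cons h b F hh j (by omega)]
      simp only [Nat.add_sub_cancel, List.take_zero, List.nil_append]
      exact hdrop (pvTailAux b j) (le_trans (pvTailAux_le b j) (by omega))
    · rw [if_neg (by rintro ⟨-, hp⟩; rw [hidx] at hp; exact hpb hp)]
      rw [if_neg (by rintro ⟨-, hp⟩; simp at hp; exact hpb hp)]
      simp only [List.take_zero, List.nil_append]
      exact hdrop (j + 1) (by omega)

lemma pvExtract_eq (t : String) (recs : List (String × List String)) (pre : List String)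
    (hpre : pvNoHead pre) (hrecs : pvWF recs)
    (ht : pvIsHeading t = true)  -- t.strip() == t and t starts with "## ": strip l = t forces pvIsHeading l
    (hts : PySem.Str.strip t = t)
    (ht0 : ¬ t = "") (htpb : ¬ t = "<!-- pagebreak -->") :
    (pvExtract (pre ++ pvFlattenRecs recs) t).1
      = pre ++ (pvDropRec t recs).1 ++ pvFlattenRecs (pvDropRec t recs).2 := by
  have hnoH : ∀ l, pvIsHeading l = false → ¬ PySem.Str.strip l = t :=
    fun l hl => pvNoMatch_of_noHead t ht hts l hl
  induction recs generalizing pre with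
  | nil =>
    have hnone : pvFindIdxAux t 0 (pre ++ pvFlattenRecs []) = none := by
      apply pvFindIdxAux_none
      intro l hl
      simp only [pvFlattenRecs, List.append_nil] at hl
      exact hnoH l (hpre l hl)
    simp only [pvFlattenRecs, List.append_nil] at hnone ⊢
    simp [pvExtract, hnone, pvDropRec, pvFlattenRecs]
  | cons p rest ih =>
    obtain ⟨h, b⟩ := p
    have hwfh := hrecs (h, b) (by simp)
    have hwfrest : pvWF rest := fun q hq => hrecs q (by simp [hq])
    have hFrw : pvFlattenRecs ((h, b) :: rest) = h :: (b ++ pvFlattenRecs rest) := rfl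
    by_cases hm : PySem.Str.strip h = t
    · rw [hFrw, pvExtract_shift t pre (h :: (b ++ pvFlattenRecs rest))
          (fun l hl => hnoH l (hpre l hl))]
      rw [pvExtract_matched t h b rest hm hwfh.2 hwfrest ht0 htpb]
      simp only [pvDropRec, if_pos hm]
      simp [List.append_assoc]
    · have hX : ∀ l ∈ pre ++ (h :: b), ¬ PySem.Str.strip l = t := by
        intro l hl
        rcases List.mem_append.mp hl with hl | hl
        · exact hnoH l (hpre l hl)
        · rcases List.mem_cons.mp hl with hl | hl
          · subst hl; exact hm
          · exact hnoH l (hwfh.2 l hl)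
      have hli : pre ++ pvFlattenRecs ((h, b) :: rest)
          = (pre ++ (h :: b)) ++ pvFlattenRecs rest := by
        rw [hFrw]; simp
      rw [hli, pvExtract_shift t (pre ++ (h :: b)) (pvFlattenRecs rest) hX]
      have hih := ih [] (by intro l hl; simp at hl) hwfrest
      simp only [List.nil_append] at hih
      rw [hih]
      simp only [pvDropRec, if_neg hm]
      simp [pvFlattenRecs, List.append_assoc]

lemma pvTrailingTail_sub (b : List String) : ∀ l ∈ pvTrailingTail b, l ∈ b := by
  intro l hl
  unfold pvTrailingTail at hl
  exact List.mem_of_mem_drop hl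

lemma pvDropRec_inv (t : String) (recs : List (String × List String)) (h : pvWF recs) :
    pvNoHead (pvDropRec t recs).1 ∧ pvWF (pvDropRec t recs).2 := by
  induction recs with
  | nil =>
    refine ⟨?_, ?_⟩ <;> · intro x hx; simp [pvDropRec] at hx
  | cons p rest ih =>
    obtain ⟨hh, bb⟩ := p
    have hwfh := h (hh, bb) (by simp)
    have hwfrest : pvWF rest := fun q hq => h q (by simp [hq])
    by_cases hm : PySem.Str.strip hh = t
    · simp only [pvDropRec, if_pos hm]
      exact ⟨fun l hl => hwfh.2 l (pvTrailingTail_sub bb l hl), hwfrest⟩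
    · simp only [pvDropRec, if_neg hm]
      have hr := ih hwfrest
      refine ⟨by intro l hl; simp at hl, ?_⟩
      intro q hq
      rcases List.mem_cons.mp hq with hq | hq
      · subst hq
        refine ⟨hwfh.1, ?_⟩
        intro l hl
        rcases List.mem_append.mp hl with hl | hl
        · exact hwfh.2 l hl
        · exact hr.1 l hl
      · exact hr.2 q hq

lemma pvEmit_corr (block : List String) (recs : List (String × List String)) (pre : List String)
    (hpre : ∀ l ∈ pre, ¬ PySem.Str.strip l = "## Action Plan (GO / LEAN / NO-GO)")
    (hrecs : pvWF recs) :
    (pvEmit block recs = none →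
      pvFindIdxAux "## Action Plan (GO / LEAN / NO-GO)" 0 (pre ++ pvFlattenRecs recs) = none)
    ∧ (∀ out, pvEmit block recs = some out →
      ∃ a, pvFindIdxAux "## Action Plan (GO / LEAN / NO-GO)" 0 (pre ++ pvFlattenRecs recs) = some a
        ∧ (pre ++ pvFlattenRecs recs).take a ++ block ++ (pre ++ pvFlattenRecs recs).drop a
            = pre ++ out) := by
  induction recs generalizing pre with
  | nil =>
    constructor
    · intro _
      apply pvFindIdxAux_none
      intro l hl
      simp only [pvFlattenRecs, List.append_nil] at hl
      exact hpre l hl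
    · intro out hout; cases hout
  | cons p rest ih =>
    obtain ⟨h, b⟩ := p
    have hwfh := hrecs (h, b) (by simp)
    have hwfrest : pvWF rest := fun q hq => hrecs q (by simp [hq])
    have hFrw : pvFlattenRecs ((h, b) :: rest) = h :: (b ++ pvFlattenRecs rest) := rfl
    by_cases hm : PySem.Str.strip h = "## Action Plan (GO / LEAN / NO-GO)"
    · constructor
      · intro hnone
        simp only [pvEmit, if_pos hm] at hnone
        exact absurd hnone (Option.some_ne_none _)
      · intro out hout
        simp only [pvEmit, if_pos hm, Option.some.injEq] at hout
        refine ⟨pre.length, ?_, ?_⟩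
        · rw [hFrw, pvFindIdxAux_append _ 0 pre _ hpre]
          simp only [Nat.zero_add, pvFindIdxAux, if_pos hm]
        · rw [hFrw, ← hout]
          have h1 : (pre ++ (h :: (b ++ pvFlattenRecs rest))).take pre.length = pre :=
            List.take_left
          have h2 : (pre ++ (h :: (b ++ pvFlattenRecs rest))).drop pre.length
              = h :: (b ++ pvFlattenRecs rest) := List.drop_left
          rw [h1, h2]
          simp
    · have hX : ∀ l ∈ pre ++ (h :: b), ¬ PySem.Str.strip l = "## Action Plan (GO / LEAN / NO-GO)" := by
        intro l hl
        rcases List.mem_append.mp hl with hl | hl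
        · exact hpre l hl
        · rcases List.mem_cons.mp hl with hl | hl
          · subst hl; exact hm
          · exact pvNoMatch_of_noHead _ (by decide) (by decide) l (hwfh.2 l hl)
      have hli : pre ++ pvFlattenRecs ((h, b) :: rest)
          = (pre ++ (h :: b)) ++ pvFlattenRecs rest := by
        rw [hFrw]; simp
      have hih := ih (pre ++ (h :: b)) hX hwfrest
      constructor
      · intro hnone
        simp only [pvEmit, if_neg hm] at hnone
        rw [hli]
        cases hrec : pvEmit block rest with
        | none => exact hih.1 hrec
        | some o => rw [hrec] at hnone; cases hnone
      · intro out hout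
        simp only [pvEmit, if_neg hm] at hout
        cases hrec : pvEmit block rest with
        | none => rw [hrec] at hout; cases hout
        | some o =>
          rw [hrec] at hout
          simp only [Option.some.injEq] at hout
          obtain ⟨a, ha1, ha2⟩ := hih.2 o hrec
          refine ⟨a, ?_, ?_⟩
          · rw [hli]; exact ha1
          · rw [hli, ha2, ← hout]
            simp

-- ===== VERDICT (by name: the statement is the Claim_ definition above) =====
theorem upsert_analyst_take_section_spec : Claim_equal_upsert_analyst_take_section := by
  intro markdown analyst _
  unfold Spec_upsert_analyst_take_section
  obtain ⟨hflat, hpre0, hwf0⟩ := pvParse_spec (PySem.Str.splitlines markdown)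
  have hinv1 := pvDropRec_inv "## Pre-Bet Checklist" (pvParse (PySem.Str.splitlines markdown)).2 hwf0
  have hinv2 := pvDropRec_inv "## Analyst Take"
    (pvDropRec "## Pre-Bet Checklist" (pvParse (PySem.Str.splitlines markdown)).2).2 hinv1.2
  have h1 : (pvExtract (PySem.Str.splitlines markdown) "## Pre-Bet Checklist").1
      = (pvParse (PySem.Str.splitlines markdown)).1
        ++ (pvDropRec "## Pre-Bet Checklist" (pvParse (PySem.Str.splitlines markdown)).2).1
        ++ pvFlattenRecs (pvDropRec "## Pre-Bet Checklist" (pvParse (PySem.Str.splitlines markdown)).2).2 := by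
    conv_lhs => rw [← hflat]
    rw [pvExtract_eq _ _ _ hpre0 hwf0 (by decide) (by decide) (by decide) (by decide)]
  have hpre1 : pvNoHead ((pvParse (PySem.Str.splitlines markdown)).1
      ++ (pvDropRec "## Pre-Bet Checklist" (pvParse (PySem.Str.splitlines markdown)).2).1) := by
    intro l hl
    rcases List.mem_append.mp hl with hl | hl
    · exact hpre0 l hl
    · exact hinv1.1 l hl
  have h2 : (pvExtract (pvExtract (PySem.Str.splitlines markdown) "## Pre-Bet Checklist").1 "## Analyst Take").1
      = ((pvParse (PySem.Str.splitlines markdown)).1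
          ++ (pvDropRec "## Pre-Bet Checklist" (pvParse (PySem.Str.splitlines markdown)).2).1)
        ++ (pvDropRec "## Analyst Take"
            (pvDropRec "## Pre-Bet Checklist" (pvParse (PySem.Str.splitlines markdown)).2).2).1
        ++ pvFlattenRecs (pvDropRec "## Analyst Take"
            (pvDropRec "## Pre-Bet Checklist" (pvParse (PySem.Str.splitlines markdown)).2).2).2 := by
    rw [h1]
    rw [show (pvParse (PySem.Str.splitlines markdown)).1
        ++ (pvDropRec "## Pre-Bet Checklist" (pvParse (PySem.Str.splitlines markdown)).2).1
        ++ pvFlattenRecs (pvDropRec "## Pre-Bet Checklist" (pvParse (PySem.Str.splitlines markdown)).2).2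
      = ((pvParse (PySem.Str.splitlines markdown)).1
        ++ (pvDropRec "## Pre-Bet Checklist" (pvParse (PySem.Str.splitlines markdown)).2).1)
        ++ pvFlattenRecs (pvDropRec "## Pre-Bet Checklist" (pvParse (PySem.Str.splitlines markdown)).2).2
      from rfl]
    exact pvExtract_eq _ _ _ hpre1 hinv1.2 (by decide) (by decide) (by decide) (by decide)
  have hpre2 : ∀ l ∈ ((pvParse (PySem.Str.splitlines markdown)).1
        ++ (pvDropRec "## Pre-Bet Checklist" (pvParse (PySem.Str.splitlines markdown)).2).1)
        ++ (pvDropRec "## Analyst Take"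
            (pvDropRec "## Pre-Bet Checklist" (pvParse (PySem.Str.splitlines markdown)).2).2).1,
      ¬ PySem.Str.strip l = "## Action Plan (GO / LEAN / NO-GO)" := by
    intro l hl
    have hlH : pvIsHeading l = false := by
      rcases List.mem_append.mp hl with hl | hl
      · exact hpre1 l hl
      · exact hinv2.1 l hl
    exact pvNoMatch_of_noHead _ (by decide) (by decide) l hlH
  have hemit := pvEmit_corr
    (["<!-- pagebreak -->", ""] ++ PySem.Str.splitlines analyst ++ ["", "<!-- pagebreak -->", ""])
    (pvDropRec "## Analyst Take"
      (pvDropRec "## Pre-Bet Checklist" (pvParse (PySem.Str.splitlines markdown)).2).2).2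
    (((pvParse (PySem.Str.splitlines markdown)).1
      ++ (pvDropRec "## Pre-Bet Checklist" (pvParse (PySem.Str.splitlines markdown)).2).1)
      ++ (pvDropRec "## Analyst Take"
          (pvDropRec "## Pre-Bet Checklist" (pvParse (PySem.Str.splitlines markdown)).2).2).1)
    hpre2 hinv2.2
  unfold upsert_analyst_take_section upsert_analyst_take_section_alt
  simp only [h2]
  cases hout : pvEmit
      (["<!-- pagebreak -->", ""] ++ PySem.Str.splitlines analyst ++ ["", "<!-- pagebreak -->", ""])
      (pvDropRec "## Analyst Take"
        (pvDropRec "## Pre-Bet Checklist" (pvParse (PySem.Str.splitlines markdown)).2).2).2 with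
  | none =>
    have hfind := hemit.1 hout
    simp only [hfind]
  | some out =>
    obtain ⟨a, hfind, hsplice⟩ := hemit.2 out hout
    simp only [hfind]
    rw [hsplice]
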